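-- pv_equiv track=rewrite | github.com/tan-eddie/google-code-jam-2018 | trouble_sort/trouble_sort.py | trouble_sort_predictor
-- ===== SOURCE A (Python) =====
-- def trouble_sort_predictor(v):
--   # Trouble sort is essentially bubble sorts on two interleaved lists.
--   # List 1 is all the even elements.
--   # List 2 is all the odd elements.
--   # So let's separate out the two lists, sort them independently
--   # (using something efficient like Python's built in sort(), and work out
--   # whether there will be an error.
--   v_even = v[0::2]
--   v_odd = v[1::2]
--   v_even.sort()
--   v_odd.sort()
--   # Note that len(v_even) always >= len(v_odd)
--   for i in range(len(v_even)):
--     # Compare with odd behind.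
--     if i > 0:
--       if v_odd[i-1] > v_even[i]:
--         return 2 * i - 1
--
--     # Compare with odd ahead.
--     if i >= len(v_odd):
--       # Reached end of list.
--       break
--     elif v_even[i] > v_odd[i]:
--       return 2 * i
--
--   return -1
-- ===== SOURCE B (Python) =====
-- def trouble_sort_predictor(v):
--   # Binary search for the first adjacent descent of the (virtual) trouble-sorted
--   # array: "prefix of length k+1 is nondecreasing" is monotone in k, so the
--   # largest k with a sorted prefix is found by bisection; no merged list is built.
--   e = sorted(v[0::2])
--   o = sorted(v[1::2])
--   n = len(v)
--
--   def val(j):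
--     return e[j // 2] if j % 2 == 0 else o[j // 2]
--
--   def sorted_prefix(k):
--     # w[0..k] is nondecreasing, i.e. no descent at an index < k
--     return all(val(j) <= val(j + 1) for j in range(k))
--
--   if n == 0:
--     return -1
--   lo, hi = 0, n - 1
--   while lo < hi:
--     mid = (lo + hi + 1) // 2
--     if sorted_prefix(mid):
--       lo = mid
--     else:
--       hi = mid - 1
--   return -1 if lo == n - 1 else lo
-- ===== Notes on version B (the rewrite author's own statement) =====
-- stated objective: alternative
-- what changed: B never scans for the inversion linearly nor builds the merged array: it accesses the trouble-sorted array virtually through an index formula (e[j//2]/o[j//2]) and finds the first adjacent descent by binary search over the monotone predicate 'the prefix of length k+1 is nondecreasing', where A walks an index loop making two staggered comparisons per step with 2*i-1/2*i arithmetic.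
import Mathlib
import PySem

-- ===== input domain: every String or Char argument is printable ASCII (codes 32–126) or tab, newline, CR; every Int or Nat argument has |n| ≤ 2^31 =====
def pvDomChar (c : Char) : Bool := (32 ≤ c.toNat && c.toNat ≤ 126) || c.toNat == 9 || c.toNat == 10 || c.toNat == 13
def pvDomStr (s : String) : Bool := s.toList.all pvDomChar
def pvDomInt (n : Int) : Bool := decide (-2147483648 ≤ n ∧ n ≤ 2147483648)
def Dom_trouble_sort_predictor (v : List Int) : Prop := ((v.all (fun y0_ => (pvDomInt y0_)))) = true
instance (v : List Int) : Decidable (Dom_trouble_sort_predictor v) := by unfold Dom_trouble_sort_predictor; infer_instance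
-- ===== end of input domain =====

-- B finds the first adjacent descent of the virtual trouble-sorted array (accessed through an
-- index formula, never materialized) by binary search over the monotone predicate "the prefix
-- is nondecreasing", instead of A's index loop with two staggered comparisons per iteration
-- (objective: alternative; same asymptotic cost).

-- ===== PORT A =====
-- A's 'for i in range(len(v_even))' loop with its early returns, as recursion over the range list
def tsLoop (ve vo : List Int) : List Int → Int
  | [] => -1
  | i :: rest =>
    if 0 < i ∧ PySem.List.pyGetD vo (i - 1) 0 > PySem.List.pyGetD ve i 0 then 2 * i - 1
    else if (vo.length : Int) ≤ i then -1
    else if PySem.List.pyGetD ve i 0 > PySem.List.pyGetD vo i 0 then 2 * i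
    else tsLoop ve vo rest

def trouble_sort_predictor (v : List Int) : Int :=
  let v_even0 := (PySem.List.slice? v (some 0) none 2).getD []
  let v_odd0 := (PySem.List.slice? v (some 1) none 2).getD []
  let v_even := PySem.List.sorted v_even0 (fun x => x) false
  let v_odd := PySem.List.sorted v_odd0 (fun x => x) false
  tsLoop v_even v_odd (PySem.List.pyRange 0 (v_even.length : Int) 1)

-- ===== PORT B =====
-- B's 'val(j)': the j-th element of the virtual trouble-sorted array (j always in range in B,
-- so the defaulted access is exact)
def pvVal (e o : List Int) (j : Nat) : Int :=
  if j % 2 == 0 then e.getD (j / 2) 0 else o.getD (j / 2) 0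

-- B's 'sorted_prefix(k)': all(val(j) <= val(j+1) for j in range(k))
def pvSortedPrefix (e o : List Int) (k : Nat) : Bool :=
  (List.range k).all (fun j => pvVal e o j ≤ pvVal e o (j + 1))

-- B's 'while lo < hi' bisection
def pvBS (e o : List Int) (lo hi : Nat) : Nat :=
  if lo < hi then
    let mid := (lo + hi + 1) / 2
    if pvSortedPrefix e o mid then pvBS e o mid hi else pvBS e o lo (mid - 1)
  else lo
termination_by hi - lo
decreasing_by all_goals omega

def trouble_sort_predictor_alt (v : List Int) : Int :=
  let e := PySem.List.sorted ((PySem.List.slice? v (some 0) none 2).getD []) (fun x => x) false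
  let o := PySem.List.sorted ((PySem.List.slice? v (some 1) none 2).getD []) (fun x => x) false
  let n := v.length
  if n = 0 then -1
  else
    let lo := pvBS e o 0 (n - 1)
    if lo = n - 1 then -1 else (lo : Int)

-- ===== PRECONDITION & SPEC =====
def Spec_trouble_sort_predictor (v : List Int) (out : Int) : Prop := out = trouble_sort_predictor_alt v
instance (v : List Int) (out : Int) : Decidable (Spec_trouble_sort_predictor v out) := by unfold Spec_trouble_sort_predictor; infer_instance

-- ===== CLAIM (what is proved, stated in full; the proofs are below) =====
def Claim_equal_trouble_sort_predictor : Prop := ∀ (v : List Int), Dom_trouble_sort_predictor v → Spec_trouble_sort_predictor v (trouble_sort_predictor v)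

-- ===== LEMMAS AND PROOFS =====

-- proof-side structural twins
def everyOther {α : Type} : List α → List α
  | [] => []
  | [a] => [a]
  | a :: _ :: t => a :: everyOther t

def sInter : List Int → List Int → List Int
  | [], ys => ys
  | x :: xs, [] => x :: xs
  | x :: xs, y :: ys => x :: y :: sInter xs ys

def sFD : List Int → Int
  | a :: b :: t => if a > b then 0 else (if sFD (b :: t) = -1 then -1 else 1 + sFD (b :: t))
  | _ => -1

-- v[0::2] is every second element
lemma slice?_even_eq (v : List Int) :
    PySem.List.slice? v (some 0) none 2 = some (everyOther v) := by
  induction v using everyOther.induct with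
  | case1 => decide
  | case2 a => simp [PySem.List.slice?, PySem.List.sliceIndices, everyOther]
  | case3 a b t ih =>
    simp only [PySem.List.slice?, PySem.List.sliceIndices, everyOther] at ih ⊢
    norm_num at ih ⊢
    have hmin : min (0:ℤ) ((t.length:ℤ) + 1 + 1) = 0 := by omega
    have hif : (0:ℤ) ≤ (t.length:ℤ) + 1 := by omega
    rw [hmin, if_pos hif]
    have hcnt : (((t.length:ℤ) + 1 + 1 - 0 + 2 - 1) / 2).toNat
        = ((if 0 < t.length then (((t.length:ℤ) + 2 - 1) / 2).toNat else 0) + 1) := by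
      split_ifs with h <;> omega
    rw [hcnt, List.range_succ_eq_map, List.filterMap_cons, List.filterMap_map]
    norm_num
    rw [show (fun x : ℕ => (a :: b :: t)[((2:ℤ) * ((x:ℤ) + 1)).toNat]?)
          = (fun x : ℕ => t[((2:ℤ) * (x:ℤ)).toNat]?) from ?_, ih]
    funext x
    have h2 : ((2:ℤ) * ((x:ℤ) + 1)).toNat = 2 * x + 2 := by omega
    have h3 : ((2:ℤ) * (x:ℤ)).toNat = 2 * x := by omega
    rw [h2, h3]
    simp

-- (a::t)[1::2] = t[0::2]
lemma slice?_cons_one (a : Int) (t : List Int) :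
    PySem.List.slice? (a :: t) (some 1) none 2 = PySem.List.slice? t (some 0) none 2 := by
  simp only [PySem.List.slice?, PySem.List.sliceIndices]
  norm_num
  congr 1
  funext x
  have h1 : ((1:ℤ) + 2 * (x:ℤ)).toNat = 2 * x + 1 := by omega
  have h2 : ((2:ℤ) * (x:ℤ)).toNat = 2 * x := by omega
  rw [h1, h2]
  simp

-- v[1::2] is every second element of the tail
lemma slice?_odd_eq (v : List Int) :
    PySem.List.slice? v (some 1) none 2 = some (everyOther v.tail) := by
  cases v with
  | nil => decide
  | cons a t => rw [slice?_cons_one, slice?_even_eq]; rfl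

lemma length_everyOther {α : Type} (v : List α) :
    (everyOther v).length = (v.length + 1) / 2 := by
  induction v using everyOther.induct with
  | case1 => simp [everyOther]
  | case2 a => simp [everyOther]
  | case3 a b t ih => simp [everyOther, ih]; omega

lemma sFD_cases (w : List Int) : sFD w = -1 ∨ 0 ≤ sFD w := by
  induction w with
  | nil => left; rfl
  | cons a t ih =>
    cases t with
    | nil => left; rfl
    | cons b t' =>
      simp only [sFD]
      split_ifs with h1 h2
      · right; omega
      · left; rfl
      · rcases ih with h | h
        · exact absurd h h2
        · right; omega

-- pyRange shifts
lemma pyRange_shift (a b : Int) :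
    PySem.List.pyRange (a + 1) (b + 1) 1 = (PySem.List.pyRange a b 1).map (· + 1) := by
  rw [PySem.List.pyRange_one, PySem.List.pyRange_one, List.map_map]
  have : b + 1 - (a + 1) = b - a := by ring
  rw [this]
  congr 1
  funext k
  simp; ring

lemma pyGetD_cons_pos (x : Int) (xs : List Int) (j : Int) (d : Int) (h : 1 ≤ j) :
    PySem.List.pyGetD (x :: xs) j d = PySem.List.pyGetD xs (j - 1) d := by
  obtain ⟨k, rfl⟩ : ∃ k : Nat, j = (k : Int) + 1 := ⟨(j - 1).toNat, by omega⟩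
  have e1 : (k : Int) + 1 = ((k + 1 : Nat) : Int) := by push_cast; ring
  have e2 : (k : Int) + 1 - 1 = ((k : Nat) : Int) := by ring
  rw [e2, e1, PySem.List.pyGetD_natCast, PySem.List.pyGetD_natCast]
  rfl

-- shifting the whole index list by one moves both compared positions down one element
lemma tsLoop_shift (a b : Int) (ve vo : List Int) (L : List Int)
    (hL : ∀ i ∈ L, 1 ≤ i) :
    tsLoop (a :: ve) (b :: vo) (L.map (· + 1)) =
      (if tsLoop ve vo L = -1 then -1 else tsLoop ve vo L + 2) := by
  induction L with
  | nil => simp [tsLoop]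
  | cons j rest ih =>
    have hj : 1 ≤ j := hL j (by simp)
    have g1 : PySem.List.pyGetD (b :: vo) (j + 1 - 1) 0 = PySem.List.pyGetD vo (j - 1) 0 := by
      rw [show j + 1 - 1 = j by ring, pyGetD_cons_pos _ _ _ _ hj]
    have g2 : PySem.List.pyGetD (a :: ve) (j + 1) 0 = PySem.List.pyGetD ve j 0 := by
      rw [pyGetD_cons_pos _ _ _ _ (by omega)]; norm_num
    have g3 : PySem.List.pyGetD (b :: vo) (j + 1) 0 = PySem.List.pyGetD vo j 0 := by
      rw [pyGetD_cons_pos _ _ _ _ (by omega)]; norm_num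
    simp only [List.map_cons, tsLoop, g1, g2, g3, List.length_cons]
    have c1 : (0 < j + 1 ∧ PySem.List.pyGetD vo (j - 1) 0 > PySem.List.pyGetD ve j 0)
        ↔ (0 < j ∧ PySem.List.pyGetD vo (j - 1) 0 > PySem.List.pyGetD ve j 0) := by
      constructor <;> (rintro ⟨_, h⟩; exact ⟨by omega, h⟩)
    have c2 : (((vo.length + 1 : Nat) : Int) ≤ j + 1) ↔ ((vo.length : Int) ≤ j) := by
      push_cast; omega
    simp only [c1, c2]
    rw [ih (fun i hi => hL i (by simp [hi]))]
    split_ifs <;> omega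

-- the heart of the A-side: A's loop from index 1 on, against the structural scan of b :: interleave
lemma tsLoop_aux (ve : List Int) : ∀ (vo : List Int) (b a : Int),
    vo.length ≤ ve.length → ve.length ≤ vo.length + 1 →
    tsLoop (a :: ve) (b :: vo) (PySem.List.pyRange 1 ((ve.length : Int) + 1) 1) =
      (if sFD (b :: sInter ve vo) = -1 then -1 else 1 + sFD (b :: sInter ve vo)) := by
  induction ve with
  | nil =>
    intro vo b a h1 h2
    have hvo : vo = [] := by cases vo <;> simp_all
    subst hvo
    rw [show ((([]:List Int)).length : Int) + 1 = 1 by norm_num,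
      PySem.List.pyRange_one_eq_nil (by norm_num : (1:Int) ≤ 1)]
    simp [tsLoop, sInter, sFD]
  | cons c ve' ih =>
    intro vo b a h1 h2
    have hlen : (1 : Int) < (((c :: ve').length : Int)) + 1 := by push_cast [List.length_cons]; omega
    rw [PySem.List.pyRange_one_cons hlen]
    have gb : PySem.List.pyGetD (b :: vo) ((1:Int) - 1) 0 = b := by
      rw [show (1:Int) - 1 = ((0:Nat):Int) by norm_num, PySem.List.pyGetD_natCast]; rfl
    have gc : PySem.List.pyGetD (a :: c :: ve') (1:Int) 0 = c := by
      rw [show (1:Int) = ((1:Nat):Int) by norm_num, PySem.List.pyGetD_natCast]; rfl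
    cases vo with
    | nil =>
      have hve' : ve' = [] := by
        cases ve' with
        | nil => rfl
        | cons _ _ => simp at h2
      subst hve'
      simp only [tsLoop, gb, gc]
      by_cases hbc : b > c
      · rw [if_pos (show (0:Int) < 1 ∧ b > c from ⟨by norm_num, hbc⟩)]
        simp [sFD, sInter, hbc]
      · rw [if_neg (fun h => hbc h.2),
          if_pos (by simp : ((([b] : List Int)).length : Int) ≤ 1)]
        simp [sFD, sInter, hbc]
    | cons d vo' =>
      have h1' : vo'.length ≤ ve'.length := by simpa using h1
      have h2' : ve'.length ≤ vo'.length + 1 := by simpa using h2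
      simp only [tsLoop, gb, gc]
      by_cases hbc : b > c
      · rw [if_pos (show (0:Int) < 1 ∧ b > c from ⟨by norm_num, hbc⟩)]
        simp [sFD, sInter, hbc]
      · rw [if_neg (fun h => hbc h.2),
          if_neg (by push_cast [List.length_cons]; omega : ¬ ((((b :: d :: vo' : List Int)).length : Int) ≤ 1))]
        have gd : PySem.List.pyGetD (b :: d :: vo') (1:Int) 0 = d := by
          rw [show (1:Int) = ((1:Nat):Int) by norm_num, PySem.List.pyGetD_natCast]; rfl
        rw [gd]
        by_cases hcd : c > d
        · rw [if_pos hcd]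
          simp [sFD, sInter, hbc, hcd]
        · rw [if_neg hcd]
          have hr : PySem.List.pyRange (1 + 1) ((((c :: ve').length : Int)) + 1) 1
              = (PySem.List.pyRange 1 ((ve'.length : Int) + 1) 1).map (· + 1) := by
            rw [show (((c :: ve').length : Int)) + 1 = ((ve'.length : Int) + 1) + 1 by
              push_cast [List.length_cons]; ring]
            exact pyRange_shift 1 ((ve'.length : Int) + 1)
          rw [hr, tsLoop_shift _ _ _ _ _ (fun i hi => (PySem.List.mem_pyRange_one.mp hi).1),
            ih vo' d c h1' h2']
          have hc2 := sFD_cases (d :: sInter ve' vo')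
          simp only [sInter, sFD, if_neg hbc, if_neg hcd]
          split_ifs <;> omega

lemma tsLoop_main (ve vo : List Int)
    (h1 : vo.length ≤ ve.length) (h2 : ve.length ≤ vo.length + 1) :
    tsLoop ve vo (PySem.List.pyRange 0 (ve.length : Int) 1) = sFD (sInter ve vo) := by
  cases ve with
  | nil =>
    have hvo : vo = [] := by cases vo <;> simp_all
    subst hvo
    simp [tsLoop, sInter, sFD, PySem.List.pyRange_one_eq_nil (by norm_num : (0:Int) ≤ 0)]
  | cons a ve' =>
    rw [PySem.List.pyRange_one_cons (by push_cast [List.length_cons]; omega : (0:Int) < ((a :: ve').length : Int))]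
    simp only [tsLoop]
    rw [if_neg (fun h => absurd h.1 (lt_irrefl 0))]
    have ga : PySem.List.pyGetD (a :: ve') ((0:Int)) 0 = a := by
      rw [show (0:Int) = ((0:Nat):Int) by norm_num, PySem.List.pyGetD_natCast]; rfl
    cases vo with
    | nil =>
      have hve' : ve' = [] := by
        cases ve' with
        | nil => rfl
        | cons _ _ => simp at h2
      subst hve'
      rw [if_pos (by simp : ((([]:List Int)).length : Int) ≤ 0)]
      simp [sInter, sFD]
    | cons b vo' =>
      have h1' : vo'.length ≤ ve'.length := by simpa using h1
      have h2' : ve'.length ≤ vo'.length + 1 := by simpa using h2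
      rw [if_neg (by push_cast [List.length_cons]; omega : ¬ ((((b :: vo' : List Int)).length : Int) ≤ 0))]
      have gb : PySem.List.pyGetD (b :: vo') ((0:Int)) 0 = b := by
        rw [show (0:Int) = ((0:Nat):Int) by norm_num, PySem.List.pyGetD_natCast]; rfl
      rw [ga, gb]
      by_cases hab : a > b
      · rw [if_pos hab]
        simp [sInter, sFD, hab]
      · rw [if_neg hab]
        rw [show (0:Int) + 1 = 1 by norm_num,
          show (((a :: ve').length : Int)) = ((ve'.length : Int) + 1) by push_cast [List.length_cons]; ring,
          tsLoop_aux ve' vo' b a h1' h2']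
        simp only [sInter, sFD, if_neg hab]

-- ===== B-side lemmas =====

lemma length_sInter (e o : List Int) : (sInter e o).length = e.length + o.length := by
  induction e generalizing o with
  | nil => cases o <;> simp [sInter]
  | cons x xs ih => cases o with
    | nil => simp [sInter]
    | cons y ys => simp [sInter, ih]; omega

-- the virtual index formula reads exactly the interleave
lemma pvVal_eq_getD (e o : List Int) (h1 : o.length ≤ e.length) (h2 : e.length ≤ o.length + 1)
    (j : Nat) : pvVal e o j = (sInter e o).getD j 0 := by
  induction e generalizing o j with
  | nil =>
    have : o = [] := by cases o <;> simp_all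
    subst this
    simp [pvVal, sInter]
  | cons x xs ih =>
    cases o with
    | nil =>
      have : xs = [] := by cases xs <;> simp_all
      subst this
      match j with
      | 0 => rfl
      | 1 => rfl
      | (k+2) =>
        simp only [pvVal, sInter]
        have hdv : (k+2)/2 = k/2 + 1 := by omega
        rw [hdv]
        split <;> simp
    | cons y ys =>
      have h1' : ys.length ≤ xs.length := by simpa using h1
      have h2' : xs.length ≤ ys.length + 1 := by simpa using h2
      match j with
      | 0 => rfl
      | 1 => rfl
      | (k+2) =>
        have := ih ys h1' h2' k
        simp only [sInter, List.getD_cons_succ]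
        rw [← this]
        simp only [pvVal]
        have e1 : (k + 2) % 2 = k % 2 := by omega
        have e2 : (k + 2) / 2 = k / 2 + 1 := by omega
        rw [e1, e2]
        by_cases hk : k % 2 = 0 <;> simp [hk]

-- first-descent characterizations of sFD via defaulted indexing
lemma sFD_neg_iff (w : List Int) :
    sFD w = -1 ↔ ∀ j, j + 1 < w.length → w.getD j 0 ≤ w.getD (j + 1) 0 := by
  induction w with
  | nil => simp [sFD]
  | cons a t ih =>
    cases t with
    | nil => simp [sFD]
    | cons b t' =>
      simp only [sFD]
      constructor
      · intro h j hj
        by_cases h1 : a > b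
        · rw [if_pos h1] at h
          exact absurd h (by norm_num)
        · rw [if_neg h1] at h
          have h2 : sFD (b :: t') = -1 := by
            rcases sFD_cases (b :: t') with hc | hc
            · exact hc
            · rw [if_neg (by omega : ¬ sFD (b :: t') = -1)] at h
              exact absurd h (by omega)
          match j with
          | 0 => simpa using not_lt.mp h1
          | (k+1) =>
            have := (ih.mp h2) k (by simpa using hj)
            simpa using this
      · intro h
        have hab : ¬ a > b := by
          have := h 0 (by simp)
          simpa using not_lt.mpr this
        have hrec : sFD (b :: t') = -1 := ih.mpr (fun k hk => by
          have := h (k+1) (by simpa using hk)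
          simpa using this)
        rw [if_neg hab, if_pos hrec]
lemma sFD_desc (w : List Int) (d : Nat) (h : sFD w = (d : Int)) :
    d + 1 < w.length ∧ w.getD (d+1) 0 < w.getD d 0 ∧
      ∀ j < d, w.getD j 0 ≤ w.getD (j + 1) 0 := by
  induction w generalizing d with
  | nil => simp [sFD] at h
  | cons a t ih =>
    cases t with
    | nil => simp [sFD] at h
    | cons b t' =>
      simp only [sFD] at h
      by_cases h1 : a > b
      · rw [if_pos h1] at h
        have hd : d = 0 := by omega
        subst hd
        exact ⟨by simp, by simpa using h1, fun j hj => absurd hj (by omega)⟩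
      · rw [if_neg h1] at h
        rcases sFD_cases (b :: t') with hc | hc
        · rw [if_pos hc] at h
          exact absurd h (by omega)
        · rw [if_neg (by omega : ¬ sFD (b :: t') = -1)] at h
          obtain ⟨d', rfl⟩ : ∃ d', d = d' + 1 := ⟨d - 1, by omega⟩
          have hrec : sFD (b :: t') = (d' : Int) := by push_cast at h ⊢; omega
          obtain ⟨hl, hdsc, hpre⟩ := ih d' hrec
          refine ⟨by simpa using Nat.succ_lt_succ hl, by simpa using hdsc, ?_⟩
          intro j hj
          match j with
          | 0 => simpa using not_lt.mp h1
          | (k+1) =>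
            have := hpre k (by omega)
            simpa using this

-- sorted_prefix(k) says exactly: no descent of the interleave at an index < k
lemma pvSortedPrefix_iff (e o : List Int) (h1 : o.length ≤ e.length)
    (h2 : e.length ≤ o.length + 1) (k : Nat) :
    pvSortedPrefix e o k = true ↔
      ∀ j < k, (sInter e o).getD j 0 ≤ (sInter e o).getD (j + 1) 0 := by
  simp only [pvSortedPrefix, List.all_eq_true, List.mem_range, decide_eq_true_eq,
    pvVal_eq_getD e o h1 h2]

-- bisection invariant: pvBS returns the largest index in [lo,hi] with a sorted prefix
lemma pvBS_spec (e o : List Int) (lo hi : Nat) (hle : lo ≤ hi)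
    (hlo : pvSortedPrefix e o lo = true) :
    lo ≤ pvBS e o lo hi ∧ pvBS e o lo hi ≤ hi ∧
      pvSortedPrefix e o (pvBS e o lo hi) = true ∧
      (pvBS e o lo hi < hi → pvSortedPrefix e o (pvBS e o lo hi + 1) = false) := by
  induction lo, hi using pvBS.induct e o with
  | case1 lo hi hlt mid hmid ih =>
    rw [pvBS, if_pos hlt]
    simp only [mid] at *
    rw [if_pos hmid]
    obtain ⟨i1, i2, i3, i4⟩ := ih (by omega) hmid
    exact ⟨by omega, i2, i3, i4⟩
  | case2 lo hi hlt mid hmid ih =>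
    rw [pvBS, if_pos hlt]
    simp only [mid] at *
    rw [if_neg (by simp [hmid])]
    obtain ⟨i1, i2, i3, i4⟩ := ih (by omega) hlo
    refine ⟨i1, by omega, i3, ?_⟩
    intro _
    by_cases hcase : pvBS e o lo ((lo + hi + 1) / 2 - 1) < (lo + hi + 1) / 2 - 1
    · exact i4 hcase
    · have hr : pvBS e o lo ((lo + hi + 1) / 2 - 1) + 1 = (lo + hi + 1) / 2 := by omega
      rw [hr]
      exact Bool.not_eq_true _ ▸ fun hcon => (by simp [hmid] at hcon : False)
  | case3 lo hi hlt =>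
    rw [pvBS, if_neg hlt]
    exact ⟨le_refl _, hle, hlo, fun h => absurd h hlt⟩

-- sFD of the interleave equals what the bisection computes
lemma pvBS_main (e o : List Int) (h1 : o.length ≤ e.length) (h2 : e.length ≤ o.length + 1)
    (n : Nat) (hn : n = e.length + o.length) (hpos : 0 < n) :
    (if pvBS e o 0 (n - 1) = n - 1 then (-1 : Int) else (pvBS e o 0 (n - 1) : Int))
      = sFD (sInter e o) := by
  set w := sInter e o with hw
  have hlen : w.length = n := by rw [hw, length_sInter]; omega
  have hmono : ∀ a b : Nat, a ≤ b → pvSortedPrefix e o b = true → pvSortedPrefix e o a = true := by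
    intro a b hab hb
    rw [pvSortedPrefix_iff e o h1 h2] at hb ⊢
    exact fun j hj => hb j (lt_of_lt_of_le hj hab)
  have hlo : pvSortedPrefix e o 0 = true := by
    rw [pvSortedPrefix_iff e o h1 h2]; omega
  obtain ⟨i1, i2, i3, i4⟩ := pvBS_spec e o 0 (n - 1) (by omega) hlo
  set r := pvBS e o 0 (n - 1) with hr
  rcases sFD_cases w with hc | hc
  · -- fully sorted: the whole prefix is sorted, so r climbs to n-1
    rw [hc]
    rw [if_pos ?_]
    by_contra hne
    have hrlt : r < n - 1 := by omega
    have := i4 hrlt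
    have hall := (sFD_neg_iff w).mp hc
    have : pvSortedPrefix e o (r + 1) = true := by
      rw [pvSortedPrefix_iff e o h1 h2, ← hw]
      intro j hj
      exact hall j (by omega)
    simp_all
  · -- a first descent exists at d = sFD w
    obtain ⟨d, hd⟩ : ∃ d : Nat, sFD w = (d : Int) := ⟨(sFD w).toNat, by omega⟩
    obtain ⟨hdl, hdesc, hpre⟩ := sFD_desc w d hd
    have hPd : pvSortedPrefix e o d = true := by
      rw [pvSortedPrefix_iff e o h1 h2, ← hw]
      exact fun j hj => hpre j hj
    have hnPd1 : pvSortedPrefix e o (d + 1) = false := by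
      by_contra hcon
      have hP : pvSortedPrefix e o (d + 1) = true := by simpa using hcon
      rw [pvSortedPrefix_iff e o h1 h2, ← hw] at hP
      have := hP d (by omega)
      omega
    -- r ≤ d since prefix d+1 is unsorted and prefixes up to r are sorted
    have hrd : r ≤ d := by
      by_contra hgt
      have : pvSortedPrefix e o (d + 1) = true := hmono (d + 1) r (by omega) i3
      simp_all
    -- r ≥ d: otherwise r < d ≤ n-2 < n-1, so ¬P(r+1); but P(d) → P(r+1)
    have hdr : d ≤ r := by
      by_contra hlt
      have hrlt : r < n - 1 := by omega
      have := i4 hrlt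
      have : pvSortedPrefix e o (r + 1) = true := hmono (r + 1) d (by omega) hPd
      simp_all
    have hreq : r = d := le_antisymm hrd hdr
    rw [hd, hreq, if_neg (by omega)]

-- ===== VERDICT (by name: the statement is the Claim_ definition above) =====
theorem trouble_sort_predictor_spec : Claim_equal_trouble_sort_predictor := by
  intro v _
  simp only [Spec_trouble_sort_predictor, trouble_sort_predictor, trouble_sort_predictor_alt,
    slice?_even_eq, slice?_odd_eq, Option.getD_some]
  set e := PySem.List.sorted (everyOther v) (fun x => x) false with he_def
  set o := PySem.List.sorted (everyOther v.tail) (fun x => x) false with ho_def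
  have he : e.length = (v.length + 1) / 2 := by
    rw [he_def, PySem.List.length_sorted, length_everyOther]
  have ho : o.length = (v.tail.length + 1) / 2 := by
    rw [ho_def, PySem.List.length_sorted, length_everyOther]
  have htail : v.tail.length = v.length - 1 := by cases v <;> simp
  have h1 : o.length ≤ e.length := by omega
  have h2 : e.length ≤ o.length + 1 := by omega
  rw [tsLoop_main e o h1 h2]
  by_cases hn : v.length = 0
  · have hv : v = [] := List.length_eq_zero_iff.mp hn
    subst hv
    simp only at he ho
    have he0 : e = [] := List.length_eq_zero_iff.mp (by omega)
    have ho0 : o = [] := List.length_eq_zero_iff.mp (by omega)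
    simp [hn, he0, ho0, sInter, sFD]
  · rw [if_neg hn, ← pvBS_main e o h1 h2 v.length (by omega) (by omega)]
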